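-- pv_equiv track=rewrite | github.com/MeSayan/code | python/week3.py | check_ascending
-- ===== SOURCE A (Python) =====
-- def check_ascending(l,left,right):
--   # Base Cases
--   if left == right:
--     return(False)
--   elif (right - left) == 1:
--     return(True)
--
--   mid = (left + right) // 2;
--
--   if l[mid] < l[left] or l[mid] > l[right-1] :
--     return(False)
--
--   return check_ascending(l,left,mid) and check_ascending(l,mid,right)
-- ===== SOURCE B (Python) =====
-- def check_ascending(l, left, right):
--     # Iterative worklist version: same divide-and-conquer judgement, no recursion.
--     if left == right:
--         return False
--     stack = [(left, right)]
--     while stack: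
--         lo, hi = stack.pop()
--         if hi - lo == 1:
--             continue
--         mid = (lo + hi) // 2
--         if l[mid] < l[lo] or l[mid] > l[hi - 1]:
--             return False
--         stack.append((lo, mid))
--         stack.append((mid, hi))
--     return True
-- ===== Notes on version B (the rewrite author's own statement) =====
-- stated objective: alternative
-- what changed: Replaces A's binary recursion by an iterative explicit-stack worklist that pops intervals, applies the same midpoint test, and pushes the two halves, preserving the quirky divide-and-conquer semantics exactly.
-- outside the precondition, e.g. on check_ascending([5, 1], 0, 3): A returns False, B returns False; on check_ascending([3, 3, 10, 3], 3, 0): A returns False, B does not finish within the time limit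
import Mathlib
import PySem

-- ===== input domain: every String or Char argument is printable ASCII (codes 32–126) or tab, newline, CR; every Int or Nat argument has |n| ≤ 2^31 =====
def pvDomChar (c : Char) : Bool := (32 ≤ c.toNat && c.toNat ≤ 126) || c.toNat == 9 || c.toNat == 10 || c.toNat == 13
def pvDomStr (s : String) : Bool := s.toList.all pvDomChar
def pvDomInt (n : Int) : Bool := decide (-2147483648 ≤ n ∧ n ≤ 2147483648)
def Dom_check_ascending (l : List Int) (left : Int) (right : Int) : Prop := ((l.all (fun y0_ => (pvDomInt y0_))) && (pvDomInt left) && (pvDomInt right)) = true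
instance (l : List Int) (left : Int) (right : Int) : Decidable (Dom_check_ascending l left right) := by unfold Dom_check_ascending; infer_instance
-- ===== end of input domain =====

-- B replaces A's recursion by an explicit worklist (stack) loop with the same interval judgement (objective: alternative decomposition, same cost).

-- midpoint bounds, needed by the ports' termination/fuel reasoning
theorem pvMidBounds (lo hi : Int) (h : 2 ≤ hi - lo) :
    lo + 1 ≤ PySem.Int.floordiv (lo + hi) 2 ∧ PySem.Int.floordiv (lo + hi) 2 ≤ hi - 1 := by
  rw [PySem.Int.floordiv_eq_ediv_of_pos (by norm_num)]
  omega

-- ===== PORT A =====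
-- literal port of A's recursion; the `right - left < 2` branch is a totality guard only
-- (Python A recurses forever there; such inputs are outside Pre_), and pyGetD's default 0
-- is never read inside Pre_ (out-of-range indices are outside Pre_).
def check_ascending (l : List Int) (left : Int) (right : Int) : Bool :=
  if left = right then false
  else if right - left = 1 then true
  else if right - left < 2 then false
  else
    let mid := PySem.Int.floordiv (left + right) 2
    if PySem.List.pyGetD l mid 0 < PySem.List.pyGetD l left 0 ∨
       PySem.List.pyGetD l (right - 1) 0 < PySem.List.pyGetD l mid 0 then false
    else check_ascending l left mid && check_ascending l mid right
termination_by (right - left).toNat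
decreasing_by
  · have := pvMidBounds left right (by omega); omega
  · have := pvMidBounds left right (by omega); omega

-- ===== PORT B =====
-- the while-stack loop of Source B; fuel is a totality guard only (2*(right-left) iterations
-- always suffice on intervals admitted by Pre_, see pvAltLoop_eq below).
def pvAltLoop (l : List Int) (fuel : Nat) (stack : List (Int × Int)) : Bool :=
  match fuel, stack with
  | _, [] => true
  | 0, _ :: _ => false
  | f + 1, (lo, hi) :: rest =>
    if hi - lo = 1 then pvAltLoop l f rest
    else
      let mid := PySem.Int.floordiv (lo + hi) 2
      if PySem.List.pyGetD l mid 0 < PySem.List.pyGetD l lo 0 ∨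
         PySem.List.pyGetD l (hi - 1) 0 < PySem.List.pyGetD l mid 0 then false
      else pvAltLoop l f ((mid, hi) :: (lo, mid) :: rest)

def check_ascending_alt (l : List Int) (left : Int) (right : Int) : Bool :=
  if left = right then false
  else pvAltLoop l (2 * (right - left).toNat + 1) [(left, right)]

-- ===== PRECONDITION & SPEC =====
-- Pre_ excludes reversed intervals (left > right), where Python A usually recurses forever
-- (RecursionError) though a failing half can short-circuit it to False while B's worklist
-- still loops, and longer intervals reaching an index outside [-len(l), len(l)), where A in
-- general raises IndexError though an early comparison can short-circuit both A and B to the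
-- same False first (see the cited excluded examples).
def Pre_check_ascending (l : List Int) (left : Int) (right : Int) : Prop :=
  left ≤ right ∧ (right - left ≤ 1 ∨ (-(l.length : Int) ≤ left ∧ right ≤ (l.length : Int)))
instance (l : List Int) (left : Int) (right : Int) : Decidable (Pre_check_ascending l left right) := by
  unfold Pre_check_ascending; infer_instance

def pvWitness_check_ascending : List Int × Int × Int := ([1, 2, 3], 0, 3)

def Spec_check_ascending (l : List Int) (left : Int) (right : Int) (out : Bool) : Prop := out = check_ascending_alt l left right
instance (l : List Int) (left : Int) (right : Int) (out : Bool) : Decidable (Spec_check_ascending l left right out) := by unfold Spec_check_ascending; infer_instance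

-- ===== CLAIM (what is proved, stated in full; the proofs are below) =====
def Claim_equal_check_ascending : Prop := ∀ (l : List Int) (left : Int) (right : Int), Dom_check_ascending l left right → Pre_check_ascending l left right → Spec_check_ascending l left right (check_ascending l left right)

-- ===== LEMMAS AND PROOFS =====

-- cost of one interval: number of loop iterations it generates
def pvCost (p : Int × Int) : Nat := 2 * (p.2 - p.1).toNat - 1

-- invariant: with enough fuel, the stack loop decides the conjunction of A's judgement
-- over all intervals on the stack
theorem pvAltLoop_eq (l : List Int) :
    ∀ (fuel : Nat) (stack : List (Int × Int)),
      (∀ p ∈ stack, p.1 < p.2) →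
      (stack.map pvCost).sum ≤ fuel →
      pvAltLoop l fuel stack = stack.all (fun p => check_ascending l p.1 p.2) := by
  intro fuel
  induction fuel with
  | zero =>
    intro stack hlt hsum
    match stack with
    | [] => rfl
    | (lo, hi) :: rest =>
      exfalso
      have h1 : lo < hi := hlt (lo, hi) (by simp)
      have : 1 ≤ pvCost (lo, hi) := by simp [pvCost]; omega
      simp [List.sum_cons] at hsum
      omega
  | succ f ih =>
    intro stack hlt hsum
    match stack with
    | [] => rfl
    | (lo, hi) :: rest =>
      have h1 : lo < hi := hlt (lo, hi) (by simp)
      have hrest : ∀ p ∈ rest, p.1 < p.2 := fun p hp => hlt p (by simp [hp])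
      by_cases hone : hi - lo = 1
      · have hsum' : (rest.map pvCost).sum ≤ f := by
          simp [List.sum_cons, pvCost] at hsum ⊢; omega
        have := ih rest hrest hsum'
        simp only [pvAltLoop, hone, if_pos]
        rw [this]
        have hok : check_ascending l lo hi = true := by
          rw [check_ascending]; simp [hone]; omega
        simp [List.all_cons, hok]
      · have h2 : 2 ≤ hi - lo := by omega
        have hmid := pvMidBounds lo hi h2
        set mid := PySem.Int.floordiv (lo + hi) 2 with hmiddef
        by_cases hcond : PySem.List.pyGetD l mid 0 < PySem.List.pyGetD l lo 0 ∨
            PySem.List.pyGetD l (hi - 1) 0 < PySem.List.pyGetD l mid 0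
        · have hA : check_ascending l lo hi = false := by
            rw [check_ascending]
            simp only [if_neg (by omega : ¬ lo = hi), if_neg hone, if_neg (by omega : ¬ hi - lo < 2)]
            rw [if_pos hcond]
          have hB : pvAltLoop l (f + 1) ((lo, hi) :: rest) = false := by
            simp only [pvAltLoop, if_neg hone]
            rw [if_pos hcond]
          rw [hB, List.all_cons, hA]; simp
        · have hA : check_ascending l lo hi =
              (check_ascending l lo mid && check_ascending l mid hi) := by
            rw [check_ascending]
            simp only [if_neg (show ¬ lo = hi from by omega), if_neg hone,
              if_neg (show ¬ hi - lo < 2 from by omega), ← hmiddef]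
            rw [if_neg hcond]
          have hB : pvAltLoop l (f + 1) ((lo, hi) :: rest) =
              pvAltLoop l f ((mid, hi) :: (lo, mid) :: rest) := by
            simp only [pvAltLoop, if_neg hone]
            rw [if_neg hcond]
          have hlt' : ∀ p ∈ ((mid, hi) :: (lo, mid) :: rest), p.1 < p.2 := by
            intro p hp
            simp only [List.mem_cons] at hp
            rcases hp with h | h | h
            · subst h; simp; omega
            · subst h; simp; omega
            · exact hrest p h
          have hsum' : (((mid, hi) :: (lo, mid) :: rest).map pvCost).sum ≤ f := by
            simp only [List.map_cons, List.sum_cons, pvCost] at hsum ⊢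
            omega
          rw [hB, ih _ hlt' hsum']
          simp only [List.all_cons, hA]
          cases check_ascending l lo mid <;> cases check_ascending l mid hi <;> simp

-- ===== VERDICT (by name: the statement is the Claim_ definition above) =====
theorem check_ascending_spec : Claim_equal_check_ascending := by
  intro l left right _ hpre
  unfold Spec_check_ascending
  unfold check_ascending_alt
  by_cases heq : left = right
  · rw [if_pos heq, check_ascending]; simp [heq]
  · rw [if_neg heq]
    have hlt : left < right := by
      rcases hpre with ⟨hle, _⟩; omega
    rw [pvAltLoop_eq l _ [(left, right)]
        (by intro p hp; simp at hp; subst hp; exact hlt)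
        (by simp [pvCost]; omega)]
    simp
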